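-- pv_equiv track=rewrite | github.com/imprv-ai/date-a-scientist | date_a_scientist/__init__.py | _add_plt_close
-- ===== SOURCE A (Python) =====
-- def _add_plt_close(text: str) -> str:
--     if "plt.savefig" in text:
--         lines = text.split("\n")
--         for i, line in enumerate(lines):
--             if line.startswith("plt.savefig"):
--                 lines.insert(i + 1, "plt.close() # HACK")
--
--         return "\n".join(lines)
--
--     return text
-- ===== SOURCE B (Python) =====
-- def _add_plt_close(text: str) -> str:
--     return "\n".join(
--         part
--         for line in text.split("\n")
--         for part in ((line, "plt.close() # HACK") if line.startswith("plt.savefig") else (line,))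
--     )
-- ===== Notes on version B (the rewrite author's own statement) =====
-- stated objective: simpler
-- what changed: Replaces the substring guard plus the enumerate-with-in-place-insert mutation loop by a single unconditional flatten: each line maps to itself or to itself plus the close line, and the pieces are joined once.
import Mathlib
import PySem

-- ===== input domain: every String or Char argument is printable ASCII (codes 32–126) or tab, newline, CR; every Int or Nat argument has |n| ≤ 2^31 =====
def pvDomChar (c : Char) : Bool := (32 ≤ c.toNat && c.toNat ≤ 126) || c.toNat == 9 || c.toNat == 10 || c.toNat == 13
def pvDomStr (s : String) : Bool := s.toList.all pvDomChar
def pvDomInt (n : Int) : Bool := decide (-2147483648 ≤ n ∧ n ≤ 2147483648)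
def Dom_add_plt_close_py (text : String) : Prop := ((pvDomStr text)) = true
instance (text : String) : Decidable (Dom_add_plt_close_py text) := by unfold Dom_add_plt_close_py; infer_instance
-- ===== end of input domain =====

-- B replaces A's guard + enumerate/insert mutation loop by a single unconditional
-- flatten of a per-line comprehension (each line maps to itself, or to itself plus the
-- close line); objective: simpler/idiomatic, same cost.

-- ===== PORT A =====
-- Python's `for i, line in enumerate(lines)` iterates by index over a list that
-- `lines.insert(i + 1, …)` grows in place; modeled as (processed, remaining) with fuel
-- 2*len+1: each step consumes one cell of `remaining`, an insert adds exactly one cell,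
-- so the fuel is never exhausted (proved in pvALoop_eq below).
def pvALoop : Nat → List String → List String → List String
  | 0, done, _ => done
  | _ + 1, done, [] => done
  | fuel + 1, done, l :: rest =>
    if PySem.Str.startswith l "plt.savefig" then
      pvALoop fuel (done ++ [l]) ("plt.close() # HACK" :: rest)
    else
      pvALoop fuel (done ++ [l]) rest

def add_plt_close_py (text : String) : String :=
  if PySem.Str.isIn "plt.savefig" text then
    PySem.Str.join "\n"
      (pvALoop (2 * ((PySem.Str.split? text "\n").getD []).length + 1) []
        ((PySem.Str.split? text "\n").getD []))
  else
    text

-- ===== PORT B =====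
-- the inner generator of Source B: one line becomes one or two output lines
def pvStep (line : String) : List String :=
  if PySem.Str.startswith line "plt.savefig" then [line, "plt.close() # HACK"] else [line]

def add_plt_close_py_alt (text : String) : String :=
  PySem.Str.join "\n" (((PySem.Str.split? text "\n").getD []).flatMap pvStep)

-- ===== PRECONDITION & SPEC =====
def Spec_add_plt_close_py (text : String) (out : String) : Prop := out = add_plt_close_py_alt text
instance (text : String) (out : String) : Decidable (Spec_add_plt_close_py text out) := by unfold Spec_add_plt_close_py; infer_instance

-- ===== CLAIM (what is proved, stated in full; the proofs are below) =====
def Claim_equal_add_plt_close_py : Prop := ∀ (text : String), Dom_add_plt_close_py text → Spec_add_plt_close_py text (add_plt_close_py text)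

-- ===== LEMMAS AND PROOFS =====

lemma pv_modifyHead_id {α : Type} (l : List α) : l.modifyHead (fun x => x) = l := by
  cases l <;> simp

lemma pv_modifyHead_congr {α : Type} (f g : α → α) (l : List α) (h : ∀ x, f x = g x) :
    l.modifyHead f = l.modifyHead g := by
  cases l <;> simp [h]

-- PySem's splitOn by a one-character separator is Mathlib's List.splitOn
lemma pv_splitOn_go_single (c : Char) :
    ∀ (l : List Char) (fuel : Nat), l.length < fuel → ∀ (cur : List Char) (acc : List (List Char)),
      PySem.Chars.splitOn.go [c] fuel l cur acc
        = acc.reverse ++ (List.splitOn c l).modifyHead (cur.reverse ++ ·) := by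
  intro l
  induction l with
  | nil =>
      intro fuel hf cur acc
      obtain ⟨f, rfl⟩ : ∃ f, fuel = f + 1 := ⟨fuel - 1, by omega⟩
      simp [PySem.Chars.splitOn.go, List.splitOn, List.splitOnP_nil]
  | cons a rest ih =>
      intro fuel hf cur acc
      obtain ⟨f, rfl⟩ : ∃ f, fuel = f + 1 := ⟨fuel - 1, by omega⟩
      have hr : rest.length < f := by simpa using Nat.lt_of_succ_lt_succ hf
      by_cases hc : c = a
      · subst hc
        have hpre : List.isPrefixOf [c] (c :: rest) = true := by
          simp [List.isPrefixOf]
        rw [PySem.Chars.splitOn.go]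
        simp only [hpre, if_true, List.length_singleton, List.drop_succ_cons, List.drop_zero]
        rw [ih f hr]
        simp [List.splitOn, List.splitOnP_cons, pv_modifyHead_id]
      · have hpre : List.isPrefixOf [c] (a :: rest) = false := by
          simp [List.isPrefixOf]
          exact fun h => absurd h hc
        rw [PySem.Chars.splitOn.go]
        simp only [hpre, Bool.false_eq_true, if_false]
        rw [ih f hr]
        have : (List.splitOn c (a :: rest)).modifyHead (cur.reverse ++ ·)
            = (List.splitOn c rest).modifyHead ((a :: cur).reverse ++ ·) := by
          simp only [List.splitOn, List.splitOnP_cons]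
          rw [if_neg (show ¬((a == c) = true) by
            simp only [beq_iff_eq]; exact fun h => hc h.symm)]
          rw [List.modifyHead_modifyHead]
          exact pv_modifyHead_congr _ _ _ (by intro x; simp)
        rw [this]

lemma pv_splitOn_single (c : Char) (s : List Char) :
    PySem.Chars.splitOn s [c] = List.splitOn c s := by
  unfold PySem.Chars.splitOn
  rw [pv_splitOn_go_single c s (s.length + 1) (by omega)]
  simp [pv_modifyHead_id]

lemma pv_join_splitOn (c : Char) (s : List Char) :
    PySem.Chars.join [c] (PySem.Chars.splitOn s [c]) = s := by
  rw [pv_splitOn_single]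
  simpa [PySem.Chars.join] using List.intercalate_splitOn s c

-- every piece of an intercalation is an infix of it
lemma pv_mem_intercalate_infix (sep : List Char) :
    ∀ (ps : List (List Char)) (x : List Char), x ∈ ps → x <:+: sep.intercalate ps := by
  intro ps
  induction ps with
  | nil => intro x hx; cases hx
  | cons p rest ih =>
      intro x hx
      cases rest with
      | nil =>
          simp at hx
          subst hx
          simp [List.intercalate]
      | cons q rest' =>
          have hsplit : sep.intercalate (p :: q :: rest') = p ++ sep ++ sep.intercalate (q :: rest') := by
            simp [List.intercalate, List.intersperse]
          rcases List.mem_cons.mp hx with rfl | hx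
          · rw [hsplit]
            exact ⟨[], sep ++ sep.intercalate (q :: rest'), by simp⟩
          · have := ih x hx
            rw [hsplit]
            calc x <:+: sep.intercalate (q :: rest') := this
              _ <:+: p ++ sep ++ sep.intercalate (q :: rest') :=
                  (List.suffix_append (p ++ sep) _).isInfix
            
lemma pv_mem_splitOn_infix (c : Char) {x s : List Char} (h : x ∈ List.splitOn c s) :
    x <:+: s := by
  have := pv_mem_intercalate_infix [c] (List.splitOn c s) x h
  rwa [List.intercalate_splitOn s c] at this

-- A's mutation loop computes B's flatten
lemma pvALoop_eq : ∀ (todo done : List String) (f : Nat), 2 * todo.length ≤ f →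
    pvALoop (f + 1) done todo = done ++ todo.flatMap pvStep := by
  intro todo
  induction todo with
  | nil => intro done f _; simp [pvALoop]
  | cons l rest ih =>
      intro done f hf
      simp only [List.length_cons] at hf
      by_cases hm : PySem.Str.startswith l "plt.savefig" = true
      · obtain ⟨f', rfl⟩ : ∃ f', f = f' + 1 := ⟨f - 1, by omega⟩
        obtain ⟨f'', rfl⟩ : ∃ f'', f' = f'' + 1 := ⟨f' - 1, by omega⟩
        rw [pvALoop, if_pos hm, pvALoop, if_neg (by decide)]
        rw [ih _ f'' (by omega)]
        simp only [List.flatMap_cons, pvStep]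
        rw [if_pos hm]
        simp
      · obtain ⟨f', rfl⟩ : ∃ f', f = f' + 1 := ⟨f - 1, by omega⟩
        rw [pvALoop, if_neg hm, ih _ f' (by omega)]
        simp only [List.flatMap_cons, pvStep]
        rw [if_neg hm]
        simp

-- the split of text into lines, explicitly
lemma pv_lines_eq (text : String) :
    (PySem.Str.split? text "\n").getD []
      = (List.splitOn '\n' text.toList).map String.ofList := by
  simp [PySem.Str.split?, PySem.Chars.split?, pv_splitOn_single]

lemma pv_flatMap_id (ls : List String)
    (h : ∀ l ∈ ls, PySem.Str.startswith l "plt.savefig" = false) :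
    ls.flatMap pvStep = ls := by
  induction ls with
  | nil => rfl
  | cons l rest ih =>
      have hl := h l (by simp)
      simp only [List.flatMap_cons, pvStep, hl, Bool.false_eq_true, if_false]
      simp [ih (fun x hx => h x (by simp [hx]))]

-- ===== VERDICT (by name: the statement is the Claim_ definition above) =====
theorem add_plt_close_py_spec : Claim_equal_add_plt_close_py := by
  intro text _
  unfold Spec_add_plt_close_py add_plt_close_py add_plt_close_py_alt
  by_cases hin : PySem.Str.isIn "plt.savefig" text = true
  · rw [if_pos hin,
      pvALoop_eq ((PySem.Str.split? text "\n").getD []) [] _ (by omega)]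
    simp
  · rw [if_neg hin]
    have hnone : ∀ l ∈ (PySem.Str.split? text "\n").getD [],
        PySem.Str.startswith l "plt.savefig" = false := by
      intro l hl
      rw [pv_lines_eq] at hl
      obtain ⟨x, hx, rfl⟩ := List.mem_map.mp hl
      by_contra hsw
      have hsw' : PySem.Chars.startswith x ("plt.savefig".toList) = true := by
        have := PySem.Str.startswith_eq (String.ofList x) "plt.savefig"
        simp only [String.toList_ofList] at this
        rw [this] at hsw
        exact Bool.of_not_eq_false hsw
      have hpref : ("plt.savefig".toList) <+: x := by
        simpa [PySem.Chars.startswith] using hsw'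
      have hinf : ("plt.savefig".toList) <:+: text.toList :=
        hpref.isInfix.trans (pv_mem_splitOn_infix '\n' hx)
      have : PySem.Str.isIn "plt.savefig" text = true := by
        rw [PySem.Str.isIn_eq]
        exact (PySem.Chars.isIn_iff_infix _ _).mpr hinf
      exact hin this
    rw [pv_flatMap_id _ hnone]
    apply String.toList_inj.mp
    rw [PySem.Str.toList_join, pv_lines_eq]
    rw [List.map_map]
    have : (String.toList ∘ String.ofList) = id := by
      funext x; simp
    rw [this, List.map_id]
    have := pv_join_splitOn '\n' text.toList
    rw [pv_splitOn_single] at this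
    simpa using this.symm
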